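-- pv_equiv track=rewrite | github.com/tomytp/ICPC-Training | mock-exams/UKIEP_2024/eg.py | min_removal_cost
-- ===== SOURCE A (Python) =====
-- def min_removal_cost(arr):
--     n = len(arr)
--     # dp[mask] represents minimum cost to make array sorted using the subset of elements
--     # represented by mask (1 means keep element, 0 means remove)
--     dp = {}
--
--     def is_sorted(mask):
--         # Get array corresponding to current mask
--         nums = [arr[i] for i in range(n) if (mask >> i) & 1]
--         return all(nums[i] <= nums[i+1] for i in range(len(nums)-1))
--
--     def get_intervals_cost(mask):
--         # Calculate cost of removal intervals
--         interval_len = 0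
--         cost = 0
--         # Count consecutive zeros to get interval lengths
--         for i in range(n):
--             if not ((mask >> i) & 1):
--                 interval_len += 1
--             else:
--                 if interval_len > 0:
--                     cost += interval_len * interval_len
--                 interval_len = 0
--         if interval_len > 0:
--             cost += interval_len * interval_len
--         return cost
--
--     def solve(mask):
--         if mask in dp:
--             return dp[mask]
--
--         # If current selection is sorted, return cost of removals
--         if is_sorted(mask):
--             return get_intervals_cost(mask)
--
--         min_cost = float('inf')
--         # Try removing each element
--         for i in range(n):
--             if (mask >> i) & 1:  # if element is currently kept
--                 # Try removing it
--                 new_mask = mask ^ (1 << i)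
--                 min_cost = min(min_cost, solve(new_mask))
--
--         dp[mask] = min_cost
--         return min_cost
--
--     # Start with all elements kept (mask of all 1s)
--     initial_mask = (1 << n) - 1
--     return solve(initial_mask)
-- ===== SOURCE B (Python) =====
-- def min_removal_cost(arr):
--     # O(n^2) memoized DP over (position, index of last kept element) instead of
--     # A's exponential top-down search over bitmask subsets.
--     n = len(arr)
--     memo = {}
--
--     def g(i, j):
--         # minimum cost for the suffix arr[i:], given that the last kept element
--         # has index j (j == -1: nothing kept yet); the squared cost of the gap
--         # currently open after position j is paid when the gap closes.
--         if i == n: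
--             return (n - 1 - j) * (n - 1 - j)
--         if (i, j) in memo:
--             return memo[(i, j)]
--         best = g(i + 1, j)  # remove arr[i]
--         if j < 0 or arr[j] <= arr[i]:
--             best = min(best, (i - 1 - j) * (i - 1 - j) + g(i + 1, i))  # keep arr[i]
--         memo[(i, j)] = best
--         return best
--
--     return g(0, -1)
-- ===== Notes on version B (the rewrite author's own statement) =====
-- stated objective: faster
-- what changed: Replaced the exponential top-down search over bitmask subsets (remove elements until the kept subset is sorted, re-scanning the mask for sortedness and interval costs) by an O(n^2) memoized DP over (current position, index of last kept element) that pays each squared-gap cost as the gap closes.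
import Mathlib
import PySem

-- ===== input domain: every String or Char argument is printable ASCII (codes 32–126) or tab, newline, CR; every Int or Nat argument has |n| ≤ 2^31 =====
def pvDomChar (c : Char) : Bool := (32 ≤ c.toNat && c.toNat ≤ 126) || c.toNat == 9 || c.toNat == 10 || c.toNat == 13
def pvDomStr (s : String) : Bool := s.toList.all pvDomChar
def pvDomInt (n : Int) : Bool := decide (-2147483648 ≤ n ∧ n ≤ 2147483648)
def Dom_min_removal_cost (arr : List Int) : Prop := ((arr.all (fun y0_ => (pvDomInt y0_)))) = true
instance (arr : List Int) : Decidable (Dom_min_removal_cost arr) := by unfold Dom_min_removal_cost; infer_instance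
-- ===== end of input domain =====

-- B replaces A's exponential top-down bitmask-subset search by an O(n^2) memoized DP
-- over (position, index of last kept element); equal return value is proved on all inputs.

-- ===== PORT A =====

-- termination helper for the recursion of `solveA` (clearing a set bit decreases the mask)
theorem pvXorShiftLt (mask i : Nat) (h : mask.testBit i = true) : mask ^^^ (1 <<< i) < mask := by
  have h2 : (1 : Nat) <<< i = 2 ^ i := by simp [Nat.shiftLeft_eq]
  apply Nat.lt_of_testBit i
  · simp [Nat.testBit_xor, h2, h]
  · exact h
  · intro j hj
    simp [Nat.testBit_xor, h2, Nat.ne_of_lt hj]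

-- is_sorted(mask)
def isSortedA (arr : List Int) (n : Nat) (mask : Nat) : Bool :=
  let nums := ((List.range n).filter (fun i => mask.testBit i)).map (fun i => arr.getD i 0)
  (List.range (nums.length - 1)).all (fun i => nums.getD i 0 ≤ nums.getD (i + 1) 0)

-- get_intervals_cost(mask)
def intervalsCostA (n : Nat) (mask : Nat) : Int :=
  let st := (List.range n).foldl
    (fun (st : Int × Int) i =>
      if ¬ mask.testBit i then (st.1 + 1, st.2)
      else (0, if st.1 > 0 then st.2 + st.1 * st.1 else st.2)) (0, 0)
  if st.1 > 0 then st.2 + st.1 * st.1 else st.2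

-- min(min_cost, v) where `none` encodes float('inf')
def minOptA : Option Int → Option Int → Option Int
  | none, b => b
  | some x, none => some x
  | some x, some y => some (min x y)

mutual
  -- solve(mask); `dp` is the memo dict, values of type Option Int (`none` = float('inf'))
  def solveA (arr : List Int) (n : Nat) (mask : Nat) (dp : PySem.Dict Nat (Option Int)) :
      Option Int × PySem.Dict Nat (Option Int) :=
    match dp.get? mask with
    | some v => (v, dp)
    | none =>
      if isSortedA arr n mask then (some (intervalsCostA n mask), dp)
      else
        let r := loopA arr n mask (List.range n) none dp
        (r.1, r.2.insert mask r.1)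
  termination_by (mask, n + 1)

  -- the `for i in range(n)` loop of solve, threading (min_cost, dp)
  def loopA (arr : List Int) (n : Nat) (mask : Nat) (idxs : List Nat) (mc : Option Int)
      (dp : PySem.Dict Nat (Option Int)) : Option Int × PySem.Dict Nat (Option Int) :=
    match idxs with
    | [] => (mc, dp)
    | i :: rest =>
      if h : mask.testBit i then
        let r := solveA arr n (mask ^^^ (1 <<< i)) dp
        loopA arr n mask rest (minOptA mc r.1) r.2
      else loopA arr n mask rest mc dp
  termination_by (mask, idxs.length)
  decreasing_by
  all_goals simp_wf
  · exact Prod.Lex.left _ _ (pvXorShiftLt mask i h)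
  · exact Prod.Lex.right mask (Nat.lt_succ_self _)
  · exact Prod.Lex.right mask (Nat.lt_succ_self _)
end

def min_removal_cost (arr : List Int) : Int :=
  let n := arr.length
  -- `.getD 0` only unwraps: the top-level result is never `none` (mask 0 is always sorted)
  ((solveA arr n ((1 <<< n) - 1) PySem.Dict.empty).1).getD 0

-- ===== PORT B =====

-- g(i, j) of Source B; `memo` is the memo dict keyed by (i, j)
def gB (arr : List Int) (n : Nat) (i : Nat) (j : Int) (memo : PySem.Dict (Nat × Int) Int) :
    Int × PySem.Dict (Nat × Int) Int :=
  if n ≤ i then (((n : Int) - 1 - j) * ((n : Int) - 1 - j), memo)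
  else
    match memo.get? (i, j) with
    | some v => (v, memo)
    | none =>
      let r1 := gB arr n (i + 1) j memo
      let r2 :=
        if j < 0 ∨ PySem.List.pyGetD arr j 0 ≤ PySem.List.pyGetD arr (i : Int) 0 then
          let rk := gB arr n (i + 1) (i : Int) r1.2
          (min r1.1 (((i : Int) - 1 - j) * ((i : Int) - 1 - j) + rk.1), rk.2)
        else r1
      (r2.1, r2.2.insert (i, j) r2.1)
termination_by n - i
decreasing_by all_goals omega

def min_removal_cost_alt (arr : List Int) : Int :=
  (gB arr arr.length 0 (-1) PySem.Dict.empty).1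

-- ===== PRECONDITION & SPEC =====
def Spec_min_removal_cost (arr : List Int) (out : Int) : Prop := out = min_removal_cost_alt arr
instance (arr : List Int) (out : Int) : Decidable (Spec_min_removal_cost arr out) := by unfold Spec_min_removal_cost; infer_instance

-- ===== CLAIM (what is proved, stated in full; the proofs are below) =====
def Claim_equal_min_removal_cost : Prop := ∀ (arr : List Int), Dom_min_removal_cost arr → Spec_min_removal_cost arr (min_removal_cost arr)

-- ===== LEMMAS AND PROOFS =====

-- the memo-free version of gB
def phi (arr : List Int) (n i : Nat) (j : Int) : Int :=
  if n ≤ i then ((n : Int) - 1 - j) * ((n : Int) - 1 - j)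
  else
    let d := phi arr n (i + 1) j
    if j < 0 ∨ PySem.List.pyGetD arr j 0 ≤ PySem.List.pyGetD arr (i : Int) 0 then
      min d (((i : Int) - 1 - j) * ((i : Int) - 1 - j) + phi arr n (i + 1) (i : Int))
    else d
termination_by n - i
decreasing_by all_goals omega

-- subsequence of xs selected by the bit list bs
def select : List Int → List Bool → List Int
  | x :: xs, b :: bs => if b then x :: select xs bs else select xs bs
  | _, _ => []

-- the last kept value as a (0- or 1-element) prefix list
def prevL (arr : List Int) (j : Int) : List Int :=
  if j < 0 then [] else [PySem.List.pyGetD arr j 0]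

-- one step of the interval-cost scan, on booleans
def stepGC : (Int × Int) → Bool → (Int × Int) :=
  fun st b =>
    if ¬ b then (st.1 + 1, st.2) else (0, if st.1 > 0 then st.2 + st.1 * st.1 else st.2)

-- interval cost of a bit list, starting from an open run of length `run` and accumulator `acc`
def goCost (run acc : Int) (bs : List Bool) : Int :=
  let st := bs.foldl stepGC (run, acc)
  if st.1 > 0 then st.2 + st.1 * st.1 else st.2

-- low n bits of a mask, as a list
def bitsOf (mask n : Nat) : List Bool := (List.range n).map mask.testBit

-- v is the least element of S
def IsL (S : Int → Prop) (v : Int) : Prop := S v ∧ ∀ w, S w → v ≤ w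

-- `none` = S empty, `some v` = v least of S
def OptIsL (S : Int → Prop) : Option Int → Prop
  | none => ∀ c, ¬ S c
  | some v => IsL S v

-- costs of sorted selections from the suffix arr[i:], with last kept index j
def SelSet (arr : List Int) (j : Int) (i : Nat) (c : Int) : Prop :=
  ∃ bs : List Bool, bs.length = arr.length - i ∧
    List.IsChain (· ≤ ·) (prevL arr j ++ select (arr.drop i) bs) ∧
    c = goCost ((i : Int) - 1 - j) 0 bs

-- costs of sorted submasks of mask
def SubS (arr : List Int) (n : Nat) (mask : Nat) (c : Int) : Prop :=
  ∃ m, m ||| mask = mask ∧ isSortedA arr n m = true ∧ c = intervalsCostA n m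

def ValidD (arr : List Int) (n : Nat) (dp : PySem.Dict Nat (Option Int)) : Prop :=
  ∀ k ov, dp.get? k = some ov → ∃ v, ov = some v ∧ IsL (SubS arr n k) v

def SolveOK (arr : List Int) (n mask : Nat) (dp : PySem.Dict Nat (Option Int)) : Prop :=
  ∃ v, (solveA arr n mask dp).1 = some v ∧ IsL (SubS arr n mask) v ∧
    ValidD arr n (solveA arr n mask dp).2

-- ---- basic IsL lemmas ----

theorem IsL_unique {S : Int → Prop} {a b : Int} (ha : IsL S a) (hb : IsL S b) : a = b :=
  le_antisymm (ha.2 b hb.1) (hb.2 a ha.1)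

theorem IsL_congr {S T : Int → Prop} (h : ∀ c, S c ↔ T c) {v : Int} (hv : IsL S v) : IsL T v :=
  ⟨(h v).1 hv.1, fun w hw => hv.2 w ((h w).2 hw)⟩

theorem OptIsL_congr {S T : Int → Prop} (h : ∀ c, S c ↔ T c) {mc : Option Int}
    (hv : OptIsL S mc) : OptIsL T mc := by
  cases mc with
  | none => exact fun c hc => hv c ((h c).2 hc)
  | some v => exact IsL_congr h hv

theorem IsL_union_min {S T : Int → Prop} {a b : Int} (ha : IsL S a) (hb : IsL T b) :
    IsL (fun c => S c ∨ T c) (min a b) := by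
  constructor
  · rcases le_total a b with h | h
    · exact Or.inl (by simpa [min_eq_left h] using ha.1)
    · exact Or.inr (by simpa [min_eq_right h] using hb.1)
  · rintro w (hw | hw)
    · exact le_trans (min_le_left a b) (ha.2 w hw)
    · exact le_trans (min_le_right a b) (hb.2 w hw)

theorem IsL_add {S : Int → Prop} {v : Int} (a : Int) (hv : IsL S v) :
    IsL (fun c => ∃ c', S c' ∧ c = a + c') (a + v) := by
  constructor
  · exact ⟨v, hv.1, rfl⟩
  · rintro w ⟨c', hc', rfl⟩
    have := hv.2 c' hc'
    omega

theorem OptIsL_min {S T : Int → Prop} {mc : Option Int} {v : Int}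
    (h : OptIsL S mc) (hv : IsL T v) :
    OptIsL (fun c => S c ∨ T c) (minOptA mc (some v)) := by
  cases mc with
  | none =>
    simp only [minOptA, OptIsL]
    exact IsL_congr (fun c => by simp [(h c)]) hv
  | some a =>
    simp only [minOptA, OptIsL]
    exact IsL_union_min h hv

-- ---- goCost basics ----

theorem goCost_nil (run acc : Int) :
    goCost run acc [] = if run > 0 then acc + run * run else acc := rfl

theorem goCost_cons (run acc : Int) (b : Bool) (bs : List Bool) :
    goCost run acc (b :: bs) =
      if b then goCost 0 (if run > 0 then acc + run * run else acc) bs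
      else goCost (run + 1) acc bs := by
  cases b <;> simp [goCost, stepGC]

theorem sqIf (run acc : Int) (h : 0 ≤ run) :
    (if run > 0 then acc + run * run else acc) = acc + run * run := by
  rcases lt_or_eq_of_le h with h' | h'
  · simp [h']
  · simp [← h']

theorem goCost_add (bs : List Bool) : ∀ run acc : Int,
    goCost run acc bs = acc + goCost run 0 bs := by
  induction bs with
  | nil => intro run acc; simp [goCost_nil]; split <;> ring
  | cons b bs ih =>
    intro run acc
    cases b
    · rw [goCost_cons, goCost_cons, ih (run + 1) acc]
      simp
    · rw [goCost_cons, goCost_cons]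
      simp only [if_true]
      rw [ih 0 (if run > 0 then acc + run * run else acc),
        ih 0 (if run > 0 then 0 + run * run else 0)]
      split <;> ring

-- ---- relating A's helpers to bit lists ----

theorem intervalsCostA_eq (n mask : Nat) :
    intervalsCostA n mask = goCost 0 0 (bitsOf mask n) := by
  simp [intervalsCostA, goCost, bitsOf, List.foldl_map, stepGC]

theorem bitsOf_succ (mask n : Nat) :
    bitsOf mask (n + 1) = mask.testBit 0 :: bitsOf (mask / 2) n := by
  simp [bitsOf, List.range_succ_eq_map, List.map_map, Function.comp_def, Nat.testBit_succ]

theorem nums_eq (arr : List Int) : ∀ mask : Nat,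
    ((List.range arr.length).filter (fun i => mask.testBit i)).map (fun i => arr.getD i 0)
      = select arr (bitsOf mask arr.length) := by
  induction arr with
  | nil => intro mask; simp [select, bitsOf]
  | cons x xs ih =>
    intro mask
    rw [List.length_cons, bitsOf_succ, List.range_succ_eq_map, List.filter_cons]
    by_cases h0 : mask.testBit 0 <;>
      simp only [h0, if_true, if_false, List.map_cons, List.filter_map, Function.comp_def,
        Nat.testBit_succ, List.map_map, List.getD_cons_zero, List.getD_cons_succ, select,
        if_neg, Bool.false_eq_true, not_false_eq_true] <;>
      simpa [List.getD_eq_getElem?_getD] using ih (mask / 2)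


theorem all_iff_chain (l : List Int) :
    ((List.range (l.length - 1)).all (fun i => l.getD i 0 ≤ l.getD (i + 1) 0)) = true
      ↔ List.IsChain (· ≤ ·) l := by
  rw [List.isChain_iff_getElem]
  simp only [List.all_eq_true, List.mem_range, decide_eq_true_eq]
  constructor
  · intro h i hi
    have h2 := h i (by omega)
    rwa [List.getD_eq_getElem l 0 (by omega), List.getD_eq_getElem l 0 hi] at h2
  · intro h i hi
    rw [List.getD_eq_getElem l 0 (by omega), List.getD_eq_getElem l 0 (by omega)]
    exact h i (by omega)

theorem isSortedA_iff (arr : List Int) (m : Nat) :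
    isSortedA arr arr.length m = true
      ↔ List.IsChain (· ≤ ·) (select arr (bitsOf m arr.length)) := by
  rw [← nums_eq, ← all_iff_chain]
  simp [isSortedA]

-- ---- monotonicity: a submask never costs less ----

theorem goCost_mono : ∀ (sbs bs : List Bool),
    List.Forall₂ (fun s b => s = true → b = true) sbs bs →
    ∀ r a r' a' : Int, 0 ≤ r' → r' ≤ r → a' + r' * r' ≤ a + r * r →
    goCost r' a' bs ≤ goCost r a sbs := by
  intro sbs bs h
  induction h with
  | nil =>
    intro r a r' a' h0 h1 h2
    rw [goCost_nil, goCost_nil, sqIf _ _ h0, sqIf _ _ (le_trans h0 h1)]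
    exact h2
  | @cons s b sbs bs hsb htl ih =>
    intro r a r' a' h0 h1 h2
    rw [goCost_cons, goCost_cons]
    cases s with
    | false =>
      cases b with
      | false =>
        simp only [if_neg Bool.false_ne_true]
        exact ih (r + 1) a (r' + 1) a' (by omega) (by omega) (by nlinarith)
      | true =>
        simp only [if_neg Bool.false_ne_true, if_pos rfl]
        rw [sqIf _ _ h0]
        exact ih (r + 1) a 0 (a' + r' * r') le_rfl (by omega) (by nlinarith)
    | true =>
      have hb : b = true := hsb rfl
      subst hb
      simp only [if_pos rfl]
      rw [sqIf _ _ h0, sqIf _ _ (le_trans h0 h1)]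
      exact ih 0 (a + r * r) 0 (a' + r' * r') le_rfl le_rfl (by simpa using h2)

theorem sub_iff (m mask : Nat) :
    m ||| mask = mask ↔ ∀ i, m.testBit i = true → mask.testBit i = true := by
  constructor
  · intro h i hi
    have h2 := congrArg (fun x => Nat.testBit x i) h
    simp only [Nat.testBit_or] at h2
    rw [hi] at h2
    simpa using h2.symm
  · intro h
    apply Nat.eq_of_testBit_eq
    intro i
    simp only [Nat.testBit_or]
    cases hm : m.testBit i
    · simp
    · simp [h i hm]

theorem forall₂_map_same {R : Bool → Bool → Prop} (f g : Nat → Bool)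
    (h : ∀ x, R (f x) (g x)) : ∀ l : List Nat, List.Forall₂ R (l.map f) (l.map g) := by
  intro l
  induction l with
  | nil => simp
  | cons x t ih =>
    simp only [List.map_cons]
    exact List.Forall₂.cons (h x) ih

theorem intervalsCostA_mono (n : Nat) {m mask : Nat} (h : m ||| mask = mask) :
    intervalsCostA n mask ≤ intervalsCostA n m := by
  rw [intervalsCostA_eq, intervalsCostA_eq]
  apply goCost_mono _ _ _ 0 0 0 0 le_rfl le_rfl le_rfl
  rw [sub_iff] at h
  exact forall₂_map_same _ _ (fun x => h x) (List.range n)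

-- ---- decomposition of SubS ----

theorem subS_split (arr : List Int) (n mask : Nat) (hm : mask < 2 ^ n)
    (hns : ¬ isSortedA arr n mask = true) (c : Int) :
    SubS arr n mask c ↔
      ∃ i, i ∈ List.range n ∧ mask.testBit i = true ∧
        SubS arr n (mask ^^^ (1 <<< i)) c := by
  have hsh : ∀ i : Nat, (1 : Nat) <<< i = 2 ^ i := fun i => by simp [Nat.shiftLeft_eq]
  constructor
  · rintro ⟨m, hsub, hsort, rfl⟩
    have hne : m ≠ mask := fun he => hns (he ▸ hsort)
    have hd : ∃ i, m.testBit i ≠ mask.testBit i := by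
      by_contra hc
      push_neg at hc
      exact hne (Nat.eq_of_testBit_eq fun i => hc i)
    obtain ⟨i, hi⟩ := hd
    have hsub' := (sub_iff m mask).1 hsub
    have hmaski : mask.testBit i = true := by
      cases hmm : m.testBit i <;> cases hkk : mask.testBit i <;> simp_all
    have hmi : m.testBit i = false := by
      cases hmm : m.testBit i
      · rfl
      · exact absurd (by rw [hmm, hmaski]) hi
    have hin : i < n := by
      have h1 := Nat.ge_two_pow_of_testBit hmaski
      by_contra hni
      push_neg at hni
      have h2 : 2 ^ n ≤ 2 ^ i := Nat.pow_le_pow_right (by norm_num) hni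
      omega
    refine ⟨i, List.mem_range.2 hin, hmaski, m, ?_, hsort, rfl⟩
    rw [sub_iff]
    intro j hj
    have hji : i ≠ j := by
      intro he
      rw [← he] at hj
      rw [hmi] at hj
      exact Bool.false_ne_true hj
    simp only [Nat.testBit_xor, hsh i, Nat.testBit_two_pow, hji, decide_false, Bool.xor_false]
    exact hsub' j hj
  · rintro ⟨i, _, hbit, m, hsub, hsort, rfl⟩
    refine ⟨m, ?_, hsort, rfl⟩
    rw [sub_iff] at hsub ⊢
    intro j hj
    have h2 := hsub j hj
    simp only [Nat.testBit_xor, hsh i, Nat.testBit_two_pow] at h2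
    by_cases hji : i = j
    · subst hji
      rw [hbit] at h2
      simp at h2
    · simpa [hji] using h2

theorem isSortedA_zero (arr : List Int) (n : Nat) : isSortedA arr n 0 = true := by
  simp [isSortedA, Nat.zero_testBit]

theorem subS_nonempty (arr : List Int) (n mask : Nat) :
    SubS arr n mask (intervalsCostA n 0) :=
  ⟨0, by simp, isSortedA_zero arr n, rfl⟩

-- ---- A: solve computes the least cost over sorted submasks ----

theorem loopA_spec (arr : List Int) (n mask : Nat)
    (IH : ∀ m', m' < mask → ∀ dp, ValidD arr n dp → SolveOK arr n m' dp) :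
    ∀ (idxs : List Nat) (S0 : Int → Prop) (mc : Option Int) dp, ValidD arr n dp →
      OptIsL S0 mc →
      OptIsL (fun c => S0 c ∨ ∃ i, i ∈ idxs ∧ mask.testBit i = true ∧
          SubS arr n (mask ^^^ (1 <<< i)) c) (loopA arr n mask idxs mc dp).1
        ∧ ValidD arr n (loopA arr n mask idxs mc dp).2 := by
  intro idxs
  induction idxs with
  | nil =>
    intro S0 mc dp hdp hmc
    rw [loopA]
    exact ⟨OptIsL_congr (fun c => by simp) hmc, hdp⟩
  | cons i rest ih =>
    intro S0 mc dp hdp hmc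
    rw [loopA]
    by_cases h : mask.testBit i = true
    · rw [dif_pos h]
      obtain ⟨v, hv, hisl, hvd⟩ := IH (mask ^^^ (1 <<< i)) (pvXorShiftLt mask i h) dp hdp
      have hmc' : OptIsL (fun c => S0 c ∨ SubS arr n (mask ^^^ (1 <<< i)) c)
          (minOptA mc (solveA arr n (mask ^^^ (1 <<< i)) dp).1) := by
        rw [hv]; exact OptIsL_min hmc hisl
      obtain ⟨h1, h2⟩ := ih _ _ _ hvd hmc'
      refine ⟨OptIsL_congr (fun c => ?_) h1, h2⟩
      simp only [List.mem_cons]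
      constructor
      · rintro ((hs | ht) | ⟨i', hi', hb, hsub⟩)
        · exact Or.inl hs
        · exact Or.inr ⟨i, Or.inl rfl, h, ht⟩
        · exact Or.inr ⟨i', Or.inr hi', hb, hsub⟩
      · rintro (hs | ⟨i', (rfl | hi'), hb, hsub⟩)
        · exact Or.inl (Or.inl hs)
        · exact Or.inl (Or.inr hsub)
        · exact Or.inr ⟨i', hi', hb, hsub⟩
    · rw [dif_neg h]
      obtain ⟨h1, h2⟩ := ih S0 mc dp hdp hmc
      refine ⟨OptIsL_congr (fun c => ?_) h1, h2⟩
      simp only [List.mem_cons]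
      constructor
      · rintro (hs | ⟨i', hi', hb, hsub⟩)
        · exact Or.inl hs
        · exact Or.inr ⟨i', Or.inr hi', hb, hsub⟩
      · rintro (hs | ⟨i', (rfl | hi'), hb, hsub⟩)
        · exact Or.inl hs
        · exact absurd hb h
        · exact Or.inr ⟨i', hi', hb, hsub⟩

theorem solveA_spec (arr : List Int) (n : Nat) : ∀ mask, mask < 2 ^ n →
    ∀ dp, ValidD arr n dp → SolveOK arr n mask dp := by
  intro mask
  induction mask using Nat.strong_induction_on with
  | _ mask IH =>
    intro hm dp hdp
    unfold SolveOK
    cases hg : dp.get? mask with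
    | some ov =>
      obtain ⟨v, rfl, hisl⟩ := hdp mask ov hg
      rw [solveA, hg]
      exact ⟨v, rfl, hisl, hdp⟩
    | none =>
      rw [solveA, hg]
      by_cases hs : isSortedA arr n mask = true
      · rw [if_pos hs]
        refine ⟨_, rfl, ⟨⟨mask, Nat.or_self mask, hs, rfl⟩, ?_⟩, hdp⟩
        rintro w ⟨m, hsub, hsort, rfl⟩
        exact intervalsCostA_mono n hsub
      · rw [if_neg hs]
        have hIH : ∀ m', m' < mask → ∀ dp', ValidD arr n dp' → SolveOK arr n m' dp' :=
          fun m' hlt dp' hdp' => IH m' hlt (lt_trans hlt hm) dp' hdp'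
        obtain ⟨h1, h2⟩ := loopA_spec arr n mask hIH (List.range n)
          (fun _ => False) none dp hdp (fun c hc => hc)
        have h1' : OptIsL (SubS arr n mask) (loopA arr n mask (List.range n) none dp).1 :=
          OptIsL_congr (fun c => by rw [subS_split arr n mask hm hs c]; tauto) h1
        cases hr : (loopA arr n mask (List.range n) none dp).1 with
        | none =>
          rw [hr] at h1'
          exact absurd (subS_nonempty arr n mask) (h1' _)
        | some v =>
          rw [hr] at h1'
          refine ⟨v, by simp [hr], h1', ?_⟩
          intro k ov hk
          simp only [PySem.Dict.get?_insert] at hk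
          by_cases hkm : k = mask
          · subst hkm
            rw [if_pos rfl, hr] at hk
            cases hk
            exact ⟨v, rfl, h1'⟩
          · rw [if_neg hkm] at hk
            exact h2 k ov hk

-- ---- B: gB = phi via the memo invariant ----

def ValidM (arr : List Int) (n : Nat) (memo : PySem.Dict (Nat × Int) Int) : Prop :=
  ∀ p v, memo.get? p = some v → v = phi arr n p.1 p.2

theorem phi_pos (arr : List Int) (n i : Nat) (j : Int) (hni : ¬ n ≤ i)
    (hc : j < 0 ∨ PySem.List.pyGetD arr j 0 ≤ PySem.List.pyGetD arr (i : Int) 0) :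
    phi arr n i j = min (phi arr n (i + 1) j)
      (((i : Int) - 1 - j) * ((i : Int) - 1 - j) + phi arr n (i + 1) (i : Int)) := by
  rw [phi]
  simp only [if_neg hni, if_pos hc]

theorem phi_neg (arr : List Int) (n i : Nat) (j : Int) (hni : ¬ n ≤ i)
    (hc : ¬ (j < 0 ∨ PySem.List.pyGetD arr j 0 ≤ PySem.List.pyGetD arr (i : Int) 0)) :
    phi arr n i j = phi arr n (i + 1) j := by
  rw [phi]
  simp only [if_neg hni, if_neg hc]

theorem gB_eq (arr : List Int) (n : Nat) : ∀ (k i : Nat) (j : Int) memo, n - i ≤ k →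
    ValidM arr n memo →
    (gB arr n i j memo).1 = phi arr n i j ∧ ValidM arr n (gB arr n i j memo).2 := by
  intro k
  induction k with
  | zero =>
    intro i j memo hk hv
    have hni : n ≤ i := by omega
    rw [gB, phi, if_pos hni, if_pos hni]
    exact ⟨rfl, hv⟩
  | succ k ih =>
    intro i j memo hk hv
    by_cases hni : n ≤ i
    · rw [gB, phi, if_pos hni, if_pos hni]
      exact ⟨rfl, hv⟩
    · rw [gB, if_neg hni]
      cases hg : memo.get? (i, j) with
      | some v => exact ⟨hv (i, j) v hg, hv⟩
      | none =>
        obtain ⟨e1, v1⟩ := ih (i + 1) j memo (by omega) hv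
        by_cases hc : j < 0 ∨ PySem.List.pyGetD arr j 0 ≤ PySem.List.pyGetD arr (i : Int) 0
        · obtain ⟨e2, v2⟩ := ih (i + 1) (i : Int) _ (by omega) v1
          simp only [if_pos hc]
          constructor
          · simp only [e1, e2]
            exact (phi_pos arr n i j hni hc).symm
          · intro p v hp
            simp only [PySem.Dict.get?_insert] at hp
            by_cases hpij : p = (i, j)
            · rw [if_pos hpij] at hp
              cases hp
              subst hpij
              simp only [e1, e2]
              exact (phi_pos arr n i j hni hc).symm
            · rw [if_neg hpij] at hp
              exact v2 p v hp
        · simp only [if_neg hc]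
          constructor
          · rw [e1]
            exact (phi_neg arr n i j hni hc).symm
          · intro p v hp
            simp only [PySem.Dict.get?_insert] at hp
            by_cases hpij : p = (i, j)
            · rw [if_pos hpij] at hp
              cases hp
              subst hpij
              rw [e1]
              exact (phi_neg arr n i j hni hc).symm
            · rw [if_neg hpij] at hp
              exact v1 p v hp

-- ---- B: phi is the least cost over sorted selections ----

theorem run_cast (i : Nat) (j : Int) : ((i : Int) - 1 - j) + 1 = (((i + 1 : Nat)) : Int) - 1 - j := by
  push_cast; ring

theorem goCost_false (r : Int) (bs : List Bool) :
    goCost r 0 (false :: bs) = goCost (r + 1) 0 bs := by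
  rw [goCost_cons]; simp

theorem goCost_true (r : Int) (hr : 0 ≤ r) (bs : List Bool) :
    goCost r 0 (true :: bs) = r * r + goCost 0 0 bs := by
  have h1 : goCost r 0 (true :: bs) = goCost 0 (if r > 0 then 0 + r * r else 0) bs := by
    rw [goCost_cons]; simp
  rw [h1, sqIf r 0 hr, goCost_add]
  ring

theorem chain_prevL (arr : List Int) (j : Int) (x : Int) (t : List Int) :
    List.IsChain (· ≤ ·) (prevL arr j ++ x :: t) ↔
      ((j < 0 ∨ PySem.List.pyGetD arr j 0 ≤ x) ∧ List.IsChain (· ≤ ·) (x :: t)) := by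
  by_cases h : j < 0
  · simp [prevL, h]
  · simp [prevL, h, List.isChain_cons_cons]

theorem selSet_step (arr : List Int) (i : Nat) (j : Int) (hi : i < arr.length)
    (hj : -1 ≤ j) (hjlt : j < (i : Int)) (c : Int) :
    SelSet arr j i c ↔
      (SelSet arr j (i + 1) c ∨
        ((j < 0 ∨ PySem.List.pyGetD arr j 0 ≤ PySem.List.pyGetD arr (i : Int) 0) ∧
          ∃ c', SelSet arr (i : Int) (i + 1) c' ∧
            c = ((i : Int) - 1 - j) * ((i : Int) - 1 - j) + c')) := by
  have hr : (0 : Int) ≤ (i : Int) - 1 - j := by omega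
  have hgi : PySem.List.pyGetD arr (i : Int) 0 = arr[i] := by
    rw [PySem.List.pyGetD_natCast, List.getD_eq_getElem arr 0 hi]
  have hprev : prevL arr (i : Int) = [arr[i]] := by
    simp [prevL, hgi, Int.natCast_nonneg, not_lt.2 (Int.natCast_nonneg i)]
  have hzero : (((i + 1 : Nat)) : Int) - 1 - (i : Int) = 0 := by push_cast; ring
  constructor
  · rintro ⟨bs, hlen, hchain, rfl⟩
    cases bs with
    | nil => exfalso; simp at hlen; omega
    | cons b bs' =>
      rw [List.drop_eq_getElem_cons hi] at hchain
      simp only [List.length_cons] at hlen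
      cases b with
      | false =>
        refine Or.inl ⟨bs', by omega, ?_, ?_⟩
        · simpa [select] using hchain
        · rw [goCost_false, run_cast]
      | true =>
        simp only [select, reduceIte] at hchain
        rw [chain_prevL] at hchain
        obtain ⟨hcond, hchain'⟩ := hchain
        rw [← hgi] at hcond
        refine Or.inr ⟨hcond, goCost 0 0 bs', ⟨bs', by omega, ?_, ?_⟩, ?_⟩
        · rw [hprev]
          simpa using hchain'
        · rw [hzero]
        · rw [goCost_true _ hr]
  · rintro (⟨bs, hlen, hchain, rfl⟩ | ⟨hcond, c', ⟨bs, hlen, hchain, rfl⟩, rfl⟩)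
    · refine ⟨false :: bs, by simp; omega, ?_, ?_⟩
      · rw [List.drop_eq_getElem_cons hi]
        simpa [select] using hchain
      · rw [goCost_false, run_cast]
    · refine ⟨true :: bs, by simp; omega, ?_, ?_⟩
      · rw [List.drop_eq_getElem_cons hi]
        simp only [select, reduceIte]
        rw [chain_prevL]
        refine ⟨by rwa [hgi] at hcond, ?_⟩
        rw [hprev] at hchain
        simpa using hchain
      · rw [goCost_true _ hr, hzero]

theorem phi_isL_base (arr : List Int) (j : Int) (hj : -1 ≤ j)
    (hjlt : j < (arr.length : Int)) :
    IsL (SelSet arr j arr.length) (phi arr arr.length arr.length j) := by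
  rw [phi, if_pos le_rfl]
  constructor
  · refine ⟨[], by simp, ?_, ?_⟩
    · simp only [List.drop_length, select, List.append_nil]
      by_cases hj0 : j < 0 <;> simp [prevL, hj0]
    · rw [goCost_nil, sqIf _ _ (by omega)]
      ring
  · rintro w ⟨bs, hlen, _, rfl⟩
    have hbs : bs = [] := List.eq_nil_of_length_eq_zero (by simpa using hlen)
    subst hbs
    rw [goCost_nil, sqIf _ _ (by omega)]
    exact le_of_eq (by ring)

theorem phi_isL (arr : List Int) : ∀ (k i : Nat) (j : Int), arr.length - i ≤ k →
    i ≤ arr.length → -1 ≤ j → j < (i : Int) →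
    IsL (SelSet arr j i) (phi arr arr.length i j) := by
  intro k
  induction k with
  | zero =>
    intro i j hk hi hj hjlt
    have hie : i = arr.length := by omega
    subst hie
    exact phi_isL_base arr j hj hjlt
  | succ k ih =>
    intro i j hk hi hj hjlt
    by_cases hni : arr.length ≤ i
    · have hie : i = arr.length := by omega
      subst hie
      exact phi_isL_base arr j hj hjlt
    · have hilt : i < arr.length := by omega
      have hIH1 := ih (i + 1) j (by omega) (by omega) hj (by push_cast; omega)
      have hIH2 := ih (i + 1) (i : Int) (by omega) (by omega) (by omega)
        (by push_cast; omega)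
      by_cases hc : j < 0 ∨ PySem.List.pyGetD arr j 0 ≤ PySem.List.pyGetD arr (i : Int) 0
      · rw [phi_pos arr arr.length i j hni hc]
        refine IsL_congr (fun c => ?_) (IsL_union_min hIH1 (IsL_add _ hIH2))
        rw [selSet_step arr i j hilt hj hjlt c]
        constructor
        · rintro (h | ⟨c', hc', rfl⟩)
          · exact Or.inl h
          · exact Or.inr ⟨hc, c', hc', rfl⟩
        · rintro (h | ⟨_, c', hc', rfl⟩)
          · exact Or.inl h
          · exact Or.inr ⟨c', hc', rfl⟩
      · rw [phi_neg arr arr.length i j hni hc]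
        refine IsL_congr (fun c => ?_) hIH1
        rw [selSet_step arr i j hilt hj hjlt c]
        constructor
        · exact fun h => Or.inl h
        · rintro (h | ⟨hcond, _⟩)
          · exact h
          · exact absurd hcond hc

-- ---- bridging masks and bit lists at the top level ----

def ofBits : List Bool → Nat
  | [] => 0
  | b :: bs => (if b then 1 else 0) + 2 * ofBits bs

theorem ofBits_div2 (b : Bool) (t : List Bool) : ofBits (b :: t) / 2 = ofBits t := by
  cases b <;> simp [ofBits] <;> omega

theorem ofBits_bit0 (b : Bool) (t : List Bool) : (ofBits (b :: t)).testBit 0 = b := by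
  rw [Nat.testBit_zero]
  cases b <;> simp [ofBits] <;> omega

theorem bitsOf_ofBits : ∀ bs : List Bool, bitsOf (ofBits bs) bs.length = bs := by
  intro bs
  induction bs with
  | nil => simp [bitsOf]
  | cons b t ih =>
    rw [List.length_cons, bitsOf_succ, ofBits_div2, ofBits_bit0, ih]

theorem ofBits_testBit : ∀ (bs : List Bool) (i : Nat),
    (ofBits bs).testBit i = true → i < bs.length := by
  intro bs
  induction bs with
  | nil => intro i h; simp [ofBits, Nat.zero_testBit] at h
  | cons b t ih =>
    intro i h
    cases i with
    | zero => simp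
    | succ k =>
      rw [Nat.testBit_succ, ofBits_div2] at h
      have := ih k h
      simp only [List.length_cons]
      omega

theorem subS_full_iff (arr : List Int) (c : Int) :
    SubS arr arr.length ((1 <<< arr.length) - 1) c ↔ SelSet arr (-1) 0 c := by
  have hsh : (1 : Nat) <<< arr.length = 2 ^ arr.length := by simp [Nat.shiftLeft_eq]
  have hrun : ((0 : Nat) : Int) - 1 - (-1) = 0 := by norm_num
  constructor
  · rintro ⟨m, hsub, hsort, rfl⟩
    refine ⟨bitsOf m arr.length, by simp [bitsOf], ?_, ?_⟩
    · simp only [prevL, if_pos (by norm_num : (-1 : Int) < 0), List.nil_append, List.drop_zero]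
      exact (isSortedA_iff arr m).1 hsort
    · rw [intervalsCostA_eq, hrun]
  · rintro ⟨bs, hlen, hchain, rfl⟩
    have hlen' : bs.length = arr.length := by simpa using hlen
    refine ⟨ofBits bs, ?_, ?_, ?_⟩
    · rw [sub_iff]
      intro i hi
      have hib := ofBits_testBit bs i hi
      rw [hsh, Nat.testBit_two_pow_sub_one]
      simp only [decide_eq_true_eq]
      omega
    · rw [isSortedA_iff, ← hlen', bitsOf_ofBits]
      simpa [prevL] using hchain
    · rw [intervalsCostA_eq, ← hlen', bitsOf_ofBits, hrun]

-- ===== VERDICT (by name: the statement is the Claim_ definition above) =====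
theorem min_removal_cost_spec : Claim_equal_min_removal_cost := by
  intro arr _
  unfold Spec_min_removal_cost
  have hsh : (1 : Nat) <<< arr.length = 2 ^ arr.length := by simp [Nat.shiftLeft_eq]
  have hpos := Nat.two_pow_pos arr.length
  have hfull : (1 <<< arr.length) - 1 < 2 ^ arr.length := by omega
  have hval : ValidD arr arr.length PySem.Dict.empty := by
    intro k ov h
    rw [PySem.Dict.get?_empty] at h
    cases h
  obtain ⟨v, hv, hisl, _⟩ := solveA_spec arr arr.length _ hfull PySem.Dict.empty hval
  have hB : min_removal_cost_alt arr = phi arr arr.length 0 (-1) := by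
    unfold min_removal_cost_alt
    exact (gB_eq arr arr.length arr.length 0 (-1) PySem.Dict.empty (by omega)
      (fun p w h => by rw [PySem.Dict.get?_empty] at h; cases h)).1
  have hphi := phi_isL arr arr.length 0 (-1) (by omega) (by omega) (by norm_num) (by norm_num)
  have hisl' : IsL (SelSet arr (-1) 0) v := IsL_congr (fun c => subS_full_iff arr c) hisl
  have hvp : v = phi arr arr.length 0 (-1) := IsL_unique hisl' hphi
  show ((solveA arr arr.length ((1 <<< arr.length) - 1) PySem.Dict.empty).1).getD 0
      = min_removal_cost_alt arr
  rw [hv, hB, ← hvp]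
  rfl
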